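-- pv_equiv track=rewrite | github.com/paramashivatma/autodubber | dubber/dub_validator.py | _max_repeated_token_run
-- ===== SOURCE A (Python) =====
-- def _max_repeated_token_run(tokens):
--     longest = 0
--     current = 0
--     prev = None
--     for token in tokens:
--         if token == prev:
--             current += 1
--         else:
--             current = 1
--             prev = token
--         if current > longest:
--             longest = current
--     return longest
-- ===== SOURCE B (Python) =====
-- def _max_repeated_token_run(tokens):
--     # Group-then-reduce: split tokens into maximal runs of equal consecutive
--     # values (two-pointer scan), collect each run's length, then max (0 if empty).
--     run_lengths = []
--     n = len(tokens)
--     i = 0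
--     while i < n:
--         j = i + 1
--         while j < n and tokens[j] == tokens[i]:
--             j += 1
--         run_lengths.append(j - i)
--         i = j
--     return max(run_lengths, default=0)
-- ===== Notes on version B (the rewrite author's own statement) =====
-- stated objective: alternative
-- what changed: A's stateful single-counter scan (current/prev/longest updated per token) is replaced by a group-then-reduce shape: split the list into maximal runs of equal consecutive tokens, record each run length, and reduce with max (default 0).
import Mathlib
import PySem

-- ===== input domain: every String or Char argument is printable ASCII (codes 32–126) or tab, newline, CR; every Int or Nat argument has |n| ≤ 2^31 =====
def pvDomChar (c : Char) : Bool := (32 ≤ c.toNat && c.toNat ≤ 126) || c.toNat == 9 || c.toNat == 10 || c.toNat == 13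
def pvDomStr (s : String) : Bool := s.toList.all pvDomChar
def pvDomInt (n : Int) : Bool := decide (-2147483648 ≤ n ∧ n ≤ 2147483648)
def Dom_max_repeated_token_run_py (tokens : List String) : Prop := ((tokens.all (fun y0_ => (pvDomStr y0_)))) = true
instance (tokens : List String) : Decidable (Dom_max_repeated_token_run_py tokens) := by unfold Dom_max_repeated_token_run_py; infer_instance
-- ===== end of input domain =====

-- B replaces A's stateful single-counter scan by a group-then-reduce shape
-- (split into maximal runs, then max of run lengths); alternative, same cost.


-- ===== PORT A =====
-- one loop step: state = (longest, current, prev)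
def pvStepA (st : Int × Int × Option String) (token : String) : Int × Int × Option String :=
  let (longest, current, prev) := st
  let (current, prev) := if some token == prev then (current + 1, prev) else (1, some token)
  let longest := if current > longest then current else longest
  (longest, current, prev)

def max_repeated_token_run_py (tokens : List String) : Int :=
  (tokens.foldl pvStepA (0, 0, none)).1

-- ===== PORT B =====
-- inner while loop of Source B: advance j past consecutive tokens equal to tokens[i]
-- (fuel = number of positions left; it only makes the loop total, the steps are Source B's)
def pvScanGo (tokens : List String) (i : Nat) : Nat → Nat → Nat
  | 0, j => j
  | f + 1, j =>
    if j < tokens.length ∧ (tokens.getD j "" == tokens.getD i "") = true then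
      pvScanGo tokens i f (j + 1)
    else j

def pvScanRun (tokens : List String) (i j : Nat) : Nat :=
  pvScanGo tokens i (tokens.length - j) j

-- outer while loop of Source B: collect the run lengths
def pvOuterGo (tokens : List String) : Nat → Nat → List Int → List Int
  | 0, _, acc => acc
  | f + 1, i, acc =>
    if i < tokens.length then
      pvOuterGo tokens f (pvScanRun tokens i (i + 1))
        (acc ++ [(pvScanRun tokens i (i + 1) : Int) - (i : Int)])
    else acc

def pvOuter (tokens : List String) (i : Nat) (acc : List Int) : List Int :=
  pvOuterGo tokens (tokens.length - i) i acc

-- max(run_lengths, default=0)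
def pvPyMax0 : List Int → Int
  | [] => 0
  | x :: xs => xs.foldl (fun a b => if b > a then b else a) x

def max_repeated_token_run_py_alt (tokens : List String) : Int :=
  pvPyMax0 (pvOuter tokens 0 [])

-- ===== PRECONDITION & SPEC =====
def Spec_max_repeated_token_run_py (tokens : List String) (out : Int) : Prop := out = max_repeated_token_run_py_alt tokens
instance (tokens : List String) (out : Int) : Decidable (Spec_max_repeated_token_run_py tokens out) := by unfold Spec_max_repeated_token_run_py; infer_instance

-- ===== CLAIM (what is proved, stated in full; the proofs are below) =====
def Claim_equal_max_repeated_token_run_py : Prop := ∀ (tokens : List String), Dom_max_repeated_token_run_py tokens → Spec_max_repeated_token_run_py tokens (max_repeated_token_run_py tokens)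

-- ===== LEMMAS AND PROOFS =====

-- run-splitting restated on lists (proof device bridging the two loop shapes)
def pvCountRun (p : String) : List String → Nat × List String
  | [] => (0, [])
  | y :: ys => if y == p then ((pvCountRun p ys).1 + 1, (pvCountRun p ys).2) else (0, y :: ys)

theorem pvCountRun_rest_le (p : String) : ∀ ys : List String, (pvCountRun p ys).2.length ≤ ys.length := by
  intro ys
  induction ys with
  | nil => simp [pvCountRun]
  | cons y ys ih =>
    simp only [pvCountRun]
    split
    · exact le_trans ih (Nat.le_succ _)
    · simp

theorem pvCountRun_rest_drop (p : String) : ∀ ys : List String, (pvCountRun p ys).2 = ys.drop (pvCountRun p ys).1 := by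
  intro ys
  induction ys with
  | nil => simp [pvCountRun]
  | cons y ys ih =>
    simp only [pvCountRun]
    split
    · simpa using ih
    · simp

def pvRunLens : List String → List Int
  | [] => []
  | x :: xs => (((pvCountRun x xs).1 : Int) + 1) :: pvRunLens (pvCountRun x xs).2
termination_by l => l.length
decreasing_by exact Nat.lt_succ_of_le (pvCountRun_rest_le _ _)

-- the inner index loop computes the count of the pending run
theorem pvScanGo_eq (tokens : List String) (i : Nat) : ∀ (f j : Nat), tokens.length ≤ j + f →
    pvScanGo tokens i f j = j + (pvCountRun (tokens.getD i "") (tokens.drop j)).1 := by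
  intro f
  induction f with
  | zero =>
    intro j hf
    rw [List.drop_eq_nil_of_le (by omega)]
    simp [pvScanGo, pvCountRun]
  | succ f ih =>
    intro j hf
    by_cases h : j < tokens.length ∧ (tokens.getD j "" == tokens.getD i "") = true
    · obtain ⟨hj, heq⟩ := h
      rw [pvScanGo, if_pos ⟨hj, heq⟩]
      have heq' : tokens.getD j "" = tokens.getD i "" := by simpa using heq
      have heq2 : tokens[j]?.getD "" = tokens[i]?.getD "" := heq'
      rw [List.drop_eq_getElem_cons hj]
      have hg : tokens[j] = tokens.getD j "" := (List.getD_eq_getElem tokens "" hj).symm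
      simp [pvCountRun, hg, heq2, ih (j + 1) (by omega)]
      omega
    · rw [pvScanGo, if_neg h]
      rcases Nat.lt_or_ge j tokens.length with hj | hj
      · have hne : ¬ tokens.getD j "" = tokens.getD i "" := by
          intro hb
          exact h ⟨hj, by simpa using hb⟩
        have hne2 : ¬ tokens[j]?.getD "" = tokens[i]?.getD "" := hne
        rw [List.drop_eq_getElem_cons hj]
        have hg : tokens[j] = tokens.getD j "" := (List.getD_eq_getElem tokens "" hj).symm
        simp [pvCountRun, hg, hne2]
      · rw [List.drop_eq_nil_of_le hj]
        simp [pvCountRun]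

theorem pvScanRun_eq (tokens : List String) (i j : Nat) :
    pvScanRun tokens i j = j + (pvCountRun (tokens.getD i "") (tokens.drop j)).1 := by
  exact pvScanGo_eq tokens i (tokens.length - j) j (by omega)

-- the outer index loop computes the run lengths of the remaining suffix
theorem pvOuterGo_eq (tokens : List String) : ∀ (f i : Nat) (acc : List Int), tokens.length ≤ i + f →
    pvOuterGo tokens f i acc = acc ++ pvRunLens (tokens.drop i) := by
  intro f
  induction f with
  | zero =>
    intro i acc hf
    rw [List.drop_eq_nil_of_le (by omega)]
    simp [pvOuterGo, pvRunLens]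
  | succ f ih =>
    intro i acc hf
    by_cases hlt : i < tokens.length
    · rw [pvOuterGo, if_pos hlt]
      have hscan := pvScanRun_eq tokens i (i + 1)
      set c := (pvCountRun (tokens.getD i "") (tokens.drop (i + 1))).1 with hc
      rw [ih _ _ (by omega)]
      have hdrop : (pvCountRun (tokens.getD i "") (tokens.drop (i + 1))).2 = tokens.drop (i + 1 + c) := by
        rw [pvCountRun_rest_drop, List.drop_drop, ← hc]
      rw [List.drop_eq_getElem_cons hlt, pvRunLens,
          show tokens[i] = tokens.getD i "" from (List.getD_eq_getElem tokens "" hlt).symm,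
          ← hc, hdrop, List.append_assoc]
      congr 1
      rw [hscan]
      simp only [List.singleton_append, List.cons.injEq]
      constructor
      · push_cast; ring
      · trivial
    · rw [pvOuterGo, if_neg hlt]
      rw [List.drop_eq_nil_of_le (by omega)]
      simp [pvRunLens]

theorem pvOuter_eq (tokens : List String) (i : Nat) (acc : List Int) :
    pvOuter tokens i acc = acc ++ pvRunLens (tokens.drop i) := by
  exact pvOuterGo_eq tokens (tokens.length - i) i acc (by omega)

-- "best achievable from a pending run (value p, count c) over the remaining tokens"
def pvBmax (p : String) (c : Int) : List String → Int
  | [] => c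
  | y :: ys => if y == p then pvBmax p (c + 1) ys else max c (pvBmax y 1 ys)

theorem pvBmax_ge : ∀ (xs : List String) (p : String) (c : Int), c ≤ pvBmax p c xs := by
  intro xs
  induction xs with
  | nil => intro p c; simp [pvBmax]
  | cons y ys ih =>
    intro p c
    simp only [pvBmax]
    split
    · exact le_trans (by omega) (ih p (c + 1))
    · exact le_max_left _ _

theorem pvA_fold : ∀ (xs : List String) (l c : Int) (p : String), c ≤ l →
    (xs.foldl pvStepA (l, c, some p)).1 = max l (pvBmax p c xs) := by
  intro xs
  induction xs with
  | nil => intro l c p h; simp [pvBmax]; omega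
  | cons y ys ih =>
    intro l c p h
    simp only [List.foldl_cons, pvStepA, pvBmax]
    by_cases hy : y = p
    · subst hy
      simp only [beq_self_eq_true, if_true]
      have h1 : c + 1 ≤ max l (c + 1) := le_max_right _ _
      rw [show (if c + 1 > l then c + 1 else l) = max l (c + 1) by omega]
      rw [ih _ _ _ h1]
      have := pvBmax_ge ys y (c + 1)
      omega
    · have hb : (some y == some p) = false := by simp [hy]
      have hb2 : (y == p) = false := by simp [hy]
      simp only [hb, hb2, Bool.false_eq_true, if_false]
      have h1 : (1 : Int) ≤ max l 1 := le_max_right _ _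
      rw [show (if (1 : Int) > l then 1 else l) = max l 1 by omega]
      rw [ih _ _ _ h1]
      have := pvBmax_ge ys y 1
      omega

-- recursive form of "max of run lengths"
def pvMaxRun : List String → Int
  | [] => 0
  | x :: xs => max (((pvCountRun x xs).1 : Int) + 1) (pvMaxRun (pvCountRun x xs).2)
termination_by l => l.length
decreasing_by exact Nat.lt_succ_of_le (pvCountRun_rest_le _ _)

theorem pvMaxRun_nonneg : ∀ xs : List String, 0 ≤ pvMaxRun xs := by
  intro xs
  induction xs using pvMaxRun.induct with
  | case1 => simp [pvMaxRun]
  | case2 x xs ih =>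
    rw [pvMaxRun]
    have := le_max_right (((pvCountRun x xs).1 : Int) + 1) (pvMaxRun (pvCountRun x xs).2)
    omega

theorem pvBmax_runs : ∀ (xs : List String) (p : String) (c : Int), 1 ≤ c →
    pvBmax p c xs = max (c + ((pvCountRun p xs).1 : Int)) (pvMaxRun (pvCountRun p xs).2) := by
  intro xs
  induction xs with
  | nil => intro p c hc; simp [pvBmax, pvCountRun, pvMaxRun]; omega
  | cons y ys ih =>
    intro p c hc
    simp only [pvBmax, pvCountRun]
    by_cases hy : y = p
    · subst hy
      simp only [beq_self_eq_true, if_true]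
      rw [ih y (c + 1) (by omega)]
      push_cast
      congr 1
      omega
    · have hb : (y == p) = false := by simp [hy]
      simp only [hb, Bool.false_eq_true, if_false]
      rw [ih y 1 (le_refl _)]
      rw [pvMaxRun]
      push_cast
      omega

theorem pv_foldl_max_shift : ∀ (l : List Int) (a b : Int),
    l.foldl max (max a b) = max a (l.foldl max b) := by
  intro l
  induction l with
  | nil => intro a b; simp
  | cons y ys ih =>
    intro a b
    simp only [List.foldl_cons]
    rw [max_assoc, ih]

theorem pv_if_max : (fun (a b : Int) => if b > a then b else a) = max := by
  funext a b
  rw [max_comm]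
  simp [max_def]
  omega

theorem pvPyMax0_foldl : ∀ (l : List Int) (a : Int), 0 ≤ a →
    l.foldl max a = max a (pvPyMax0 l) := by
  intro l a ha
  cases l with
  | nil => simp [pvPyMax0]; omega
  | cons hd tl =>
    simp only [pvPyMax0, pv_if_max, List.foldl_cons]
    exact pv_foldl_max_shift tl a hd

theorem pvRunLens_maxRun : ∀ ts : List String, pvPyMax0 (pvRunLens ts) = pvMaxRun ts := by
  intro ts
  induction ts using pvMaxRun.induct with
  | case1 => simp [pvRunLens, pvMaxRun, pvPyMax0]
  | case2 x xs ih =>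
    rw [pvMaxRun, pvRunLens]
    simp only [pvPyMax0, pv_if_max]
    rw [pvPyMax0_foldl _ _ (by positivity), ih]

theorem pvAlt_eq_maxRun : ∀ tokens : List String, max_repeated_token_run_py_alt tokens = pvMaxRun tokens := by
  intro tokens
  unfold max_repeated_token_run_py_alt
  rw [pvOuter_eq tokens 0 []]
  simp only [List.drop_zero, List.nil_append]
  exact pvRunLens_maxRun tokens

-- ===== VERDICT (by name: the statement is the Claim_ definition above) =====
theorem max_repeated_token_run_py_spec : Claim_equal_max_repeated_token_run_py := by
  intro tokens _
  unfold Spec_max_repeated_token_run_py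
  rw [pvAlt_eq_maxRun]
  cases tokens with
  | nil => simp [max_repeated_token_run_py, pvMaxRun]
  | cons x xs =>
    unfold max_repeated_token_run_py
    simp only [List.foldl_cons, pvStepA]
    norm_num
    rw [pvA_fold xs 1 1 x (le_refl _)]
    rw [pvBmax_runs xs x 1 (le_refl _)]
    rw [pvMaxRun]
    have h1 := pvMaxRun_nonneg (pvCountRun x xs).2
    omega
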